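-- pv_equiv track=rewrite | github.com/2630682353/majiang | 20250219net.py | how_many_type
-- ===== SOURCE A (Python) =====
-- def how_many_type(list1):
-- 	tt = 0; tw = 0; tb = 0;
-- 	for pai in list1:
-- 		if pai < 10:
-- 			tt=1
-- 		if pai > 10 and pai < 20:
-- 			tw=1
-- 		if pai > 20:
-- 			tb=1
-- 	return tt+tw+tb
-- ===== SOURCE B (Python) =====
-- def how_many_type(list1):
--     return (any(p < 10 for p in list1)
--             + any(10 < p < 20 for p in list1)
--             + any(p > 20 for p in list1))
-- ===== Notes on version B (the rewrite author's own statement) =====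
-- stated objective: simpler
-- what changed: Replaces the single flag-setting loop with three independent any(...) presence tests, one per suit, summed as booleans.
import Mathlib
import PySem

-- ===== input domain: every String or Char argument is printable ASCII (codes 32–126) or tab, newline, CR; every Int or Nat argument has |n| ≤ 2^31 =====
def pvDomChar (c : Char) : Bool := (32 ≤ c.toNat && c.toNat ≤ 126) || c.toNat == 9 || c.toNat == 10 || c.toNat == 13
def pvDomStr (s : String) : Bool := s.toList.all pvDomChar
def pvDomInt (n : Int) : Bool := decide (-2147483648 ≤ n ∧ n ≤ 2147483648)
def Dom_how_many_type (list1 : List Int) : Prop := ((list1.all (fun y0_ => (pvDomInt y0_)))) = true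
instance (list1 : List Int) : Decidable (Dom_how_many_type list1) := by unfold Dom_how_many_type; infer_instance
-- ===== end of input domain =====

-- B replaces A's one-pass flag loop with three independent any(...) presence scans summed as booleans (simpler decomposition).

-- ===== PORT A =====
def how_many_type (list1 : List Int) : Int :=
  let s := list1.foldl (fun (st : Int × Int × Int) pai =>
    let tt := if pai < 10 then 1 else st.1
    let tw := if pai > 10 ∧ pai < 20 then 1 else st.2.1
    let tb := if pai > 20 then 1 else st.2.2
    (tt, tw, tb)) (0, 0, 0)
  s.1 + s.2.1 + s.2.2

-- ===== PORT B =====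
def how_many_type_alt (list1 : List Int) : Int :=
  (if list1.any (fun p => p < 10) then 1 else 0)
  + (if list1.any (fun p => 10 < p ∧ p < 20) then 1 else 0)
  + (if list1.any (fun p => p > 20) then 1 else 0)

-- ===== PRECONDITION & SPEC =====
def Spec_how_many_type (list1 : List Int) (out : Int) : Prop := out = how_many_type_alt list1
instance (list1 : List Int) (out : Int) : Decidable (Spec_how_many_type list1 out) := by unfold Spec_how_many_type; infer_instance

-- ===== CLAIM (what is proved, stated in full; the proofs are below) =====
def Claim_equal_how_many_type : Prop := ∀ (list1 : List Int), Dom_how_many_type list1 → Spec_how_many_type list1 (how_many_type list1)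

-- ===== LEMMAS AND PROOFS =====

theorem how_many_type_foldl (list1 : List Int) (a b c : Int) :
    list1.foldl (fun (st : Int × Int × Int) pai =>
      let tt := if pai < 10 then 1 else st.1
      let tw := if pai > 10 ∧ pai < 20 then 1 else st.2.1
      let tb := if pai > 20 then 1 else st.2.2
      (tt, tw, tb)) (a, b, c)
    = ((if list1.any (fun p => p < 10) then 1 else a),
       (if list1.any (fun p => 10 < p ∧ p < 20) then 1 else b),
       (if list1.any (fun p => p > 20) then 1 else c)) := by
  induction list1 generalizing a b c with
  | nil => simp
  | cons x xs ih =>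
      simp only [List.foldl_cons, List.any_cons, ih, decide_eq_true_eq, Bool.or_eq_true]
      by_cases h1 : x < 10 <;> by_cases h2 : 10 < x ∧ x < 20 <;> by_cases h3 : x > 20 <;>
        simp [h1, h2, h3]

-- ===== VERDICT (by name: the statement is the Claim_ definition above) =====
theorem how_many_type_spec : Claim_equal_how_many_type := by
  intro list1 _
  unfold Spec_how_many_type how_many_type how_many_type_alt
  simp [how_many_type_foldl]
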